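-- pv_equiv track=rewrite | github.com/makalowe/papypeter | GoogleDrive - Zion Garden - Pilotage/02_CRM_Prospects/crm_zion_dashboard.py | compute_kpis
-- ===== SOURCE A (Python) =====
-- def compute_kpis(rows: list[dict[str, str]]) -> dict[str, int]:
--     """Compute simple CRM KPIs from common pipeline columns."""
--     stage_col = "sales_stage"
--     stage_fallback_col = "statut"
--     mail_col = "email"
--     phone_col = "phone"
--
--     def field(row: dict[str, str], key: str) -> str:
--         return (row.get(key, "") or "").strip()
--
--     def normalize_stage(value: str) -> str:
--         s = value.lower().strip()
--         if s in {"nouveau", "new", "suspect"}: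
--             return "suspect"
--         if s in {"prospect"}:
--             return "prospect"
--         if s in {"negociation", "négociation"}:
--             return "negociation"
--         if s in {"conclusion", "client", "signed"}:
--             return "conclusion"
--         return s
--
--     stages = []
--     for r in rows:
--         raw_stage = field(r, stage_col) or field(r, stage_fallback_col)
--         stages.append(normalize_stage(raw_stage))
--
--     return {
--         "total_prospects": len(rows),
--         "with_email": sum(1 for r in rows if field(r, mail_col) != ""),
--         "with_phone": sum(1 for r in rows if field(r, phone_col) != ""),
--         "suspects": sum(1 for s in stages if s == "suspect"),
--         "prospects": sum(1 for s in stages if s == "prospect"),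
--         "negociation": sum(1 for s in stages if s == "negociation"),
--         "clients_signed": sum(1 for s in stages if s == "conclusion"),
--     }
-- ===== SOURCE B (Python) =====
-- def compute_kpis(rows: list[dict[str, str]]) -> dict[str, int]:
--     """Compute simple CRM KPIs from common pipeline columns (single pass)."""
--
--     def field(row: dict[str, str], key: str) -> str:
--         return (row.get(key, "") or "").strip()
--
--     def normalize_stage(value: str) -> str:
--         s = value.lower().strip()
--         if s in {"nouveau", "new", "suspect"}:
--             return "suspect"
--         if s in {"prospect"}:
--             return "prospect"
--         if s in {"negociation", "négociation"}:
--             return "negociation"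
--         if s in {"conclusion", "client", "signed"}:
--             return "conclusion"
--         return s
--
--     with_email = 0
--     with_phone = 0
--     counts = {"suspect": 0, "prospect": 0, "negociation": 0, "conclusion": 0}
--     for r in rows:
--         if field(r, "email") != "":
--             with_email += 1
--         if field(r, "phone") != "":
--             with_phone += 1
--         s = normalize_stage(field(r, "sales_stage") or field(r, "statut"))
--         if s in counts:
--             counts[s] += 1
--
--     return {
--         "total_prospects": len(rows),
--         "with_email": with_email,
--         "with_phone": with_phone,
--         "suspects": counts["suspect"],
--         "prospects": counts["prospect"],
--         "negociation": counts["negociation"],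
--         "clients_signed": counts["conclusion"],
--     }
-- ===== Notes on version B (the rewrite author's own statement) =====
-- stated objective: alternative
-- what changed: Replaces A's five separate generator-sum passes (plus an intermediate stages list) by a single loop over rows that accumulates all six counters at once in a counter dict / explicit accumulators.
import Mathlib
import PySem

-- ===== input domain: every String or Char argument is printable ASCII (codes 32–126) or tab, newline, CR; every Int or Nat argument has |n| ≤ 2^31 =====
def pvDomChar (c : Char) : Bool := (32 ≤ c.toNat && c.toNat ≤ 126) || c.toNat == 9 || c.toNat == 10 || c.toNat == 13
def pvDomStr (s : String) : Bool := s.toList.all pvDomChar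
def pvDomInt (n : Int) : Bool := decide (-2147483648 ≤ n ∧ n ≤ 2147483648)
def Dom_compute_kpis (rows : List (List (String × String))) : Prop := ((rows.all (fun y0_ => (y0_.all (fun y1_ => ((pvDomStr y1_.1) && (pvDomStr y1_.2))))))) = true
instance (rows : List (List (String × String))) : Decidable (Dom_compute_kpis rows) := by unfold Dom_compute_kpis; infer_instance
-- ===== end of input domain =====

-- B fuses A's five separate counting passes (and the intermediate stages list) into one
-- accumulating loop over rows; same values, same cost class ("alternative", not faster).

-- ===== PORT A =====
-- helper `field` of A: (row.get(key, "") or "").strip()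
def pvField (row : List (String × String)) (key : String) : String :=
  PySem.Str.strip (PySem.Dict.getD (PySem.Dict.mk row) key "")

-- helper `normalize_stage` of A (shared verbatim by B)
def pvNormalizeStage (value : String) : String :=
  let s := PySem.Str.strip (PySem.Str.lower value)
  if s == "nouveau" || s == "new" || s == "suspect" then "suspect"
  else if s == "prospect" then "prospect"
  else if s == "negociation" || s == "négociation" then "negociation"
  else if s == "conclusion" || s == "client" || s == "signed" then "conclusion"
  else s

-- `field(r, stage_col) or field(r, stage_fallback_col)`
def pvRawStage (r : List (String × String)) : String :=
  let a := pvField r "sales_stage"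
  if a == "" then pvField r "statut" else a

def compute_kpis (rows : List (List (String × String))) : List (String × Int) :=
  let stages := rows.map (fun r => pvNormalizeStage (pvRawStage r))
  [("total_prospects", (rows.length : Int)),
   ("with_email", ((rows.map (fun r => if pvField r "email" ≠ "" then (1 : Int) else 0)).sum)),
   ("with_phone", ((rows.map (fun r => if pvField r "phone" ≠ "" then (1 : Int) else 0)).sum)),
   ("suspects", ((stages.map (fun s => if s = "suspect" then (1 : Int) else 0)).sum)),
   ("prospects", ((stages.map (fun s => if s = "prospect" then (1 : Int) else 0)).sum)),
   ("negociation", ((stages.map (fun s => if s = "negociation" then (1 : Int) else 0)).sum)),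
   ("clients_signed", ((stages.map (fun s => if s = "conclusion" then (1 : Int) else 0)).sum))]

-- ===== PORT B =====
-- one loop step updating (with_email, with_phone, suspect, prospect, negociation, conclusion)
def pvStepB (acc : Int × Int × Int × Int × Int × Int) (r : List (String × String)) :
    Int × Int × Int × Int × Int × Int :=
  let (e, p, su, pr, ne, co) := acc
  let e := if pvField r "email" ≠ "" then e + 1 else e
  let p := if pvField r "phone" ≠ "" then p + 1 else p
  let s := pvNormalizeStage (pvRawStage r)
  (e, p,
   if s = "suspect" then su + 1 else su,
   if s = "prospect" then pr + 1 else pr,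
   if s = "negociation" then ne + 1 else ne,
   if s = "conclusion" then co + 1 else co)

def compute_kpis_alt (rows : List (List (String × String))) : List (String × Int) :=
  let (e, p, su, pr, ne, co) := rows.foldl pvStepB (0, 0, 0, 0, 0, 0)
  [("total_prospects", (rows.length : Int)),
   ("with_email", e),
   ("with_phone", p),
   ("suspects", su),
   ("prospects", pr),
   ("negociation", ne),
   ("clients_signed", co)]

-- ===== PRECONDITION & SPEC =====
def Spec_compute_kpis (rows : List (List (String × String))) (out : List (String × Int)) : Prop := out = compute_kpis_alt rows
instance (rows : List (List (String × String))) (out : List (String × Int)) : Decidable (Spec_compute_kpis rows out) := by unfold Spec_compute_kpis; infer_instance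

-- ===== CLAIM (what is proved, stated in full; the proofs are below) =====
def Claim_equal_compute_kpis : Prop := ∀ (rows : List (List (String × String))), Dom_compute_kpis rows → Spec_compute_kpis rows (compute_kpis rows)

-- ===== LEMMAS AND PROOFS =====

-- B's fold computes, added to any starting accumulators, exactly A's six sums
theorem pvFoldB_eq (rows : List (List (String × String))) :
    ∀ e p su pr ne co : Int,
    rows.foldl pvStepB (e, p, su, pr, ne, co) =
      (e + ((rows.map (fun r => if pvField r "email" ≠ "" then (1 : Int) else 0)).sum),
       p + ((rows.map (fun r => if pvField r "phone" ≠ "" then (1 : Int) else 0)).sum),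
       su + ((rows.map (fun r => if pvNormalizeStage (pvRawStage r) = "suspect" then (1 : Int) else 0)).sum),
       pr + ((rows.map (fun r => if pvNormalizeStage (pvRawStage r) = "prospect" then (1 : Int) else 0)).sum),
       ne + ((rows.map (fun r => if pvNormalizeStage (pvRawStage r) = "negociation" then (1 : Int) else 0)).sum),
       co + ((rows.map (fun r => if pvNormalizeStage (pvRawStage r) = "conclusion" then (1 : Int) else 0)).sum)) := by
  induction rows with
  | nil => intro e p su pr ne co; simp
  | cons r t ih =>
      intro e p su pr ne co
      simp only [List.foldl_cons, pvStepB, List.map_cons, List.sum_cons]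
      rw [ih]
      simp only [Prod.mk.injEq]
      refine ⟨?_, ?_, ?_, ?_, ?_, ?_⟩ <;> split_ifs <;> ring

-- ===== VERDICT (by name: the statement is the Claim_ definition above) =====
theorem compute_kpis_spec : Claim_equal_compute_kpis := by
  intro rows _
  unfold Spec_compute_kpis compute_kpis compute_kpis_alt
  rw [pvFoldB_eq rows 0 0 0 0 0 0]
  simp [List.map_map, Function.comp_def]
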